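-- pv_equiv track=rewrite | github.com/ntnu-OOAD/OOAD_project_backend | bookkeeping/apiServices/ReceiptService.py | check_receipt
-- ===== SOURCE A (Python) =====
-- def check_receipt(inputnum,nss,ns,n1):
--     money="0"
--     if inputnum == nss:
--         money="1000萬元"
--     if inputnum == ns:
--         money="200萬"
--     for i in n1:
--         if inputnum == i:
--             money="20萬"
--             break
--         if inputnum[-7:] == i[-7:]:
--             money="4萬"
--             break
--         if inputnum[-6:] == i[-6:]:
--             money="1萬"
--             break
--         if inputnum[-5:] == i[-5:]:
--             money="4000"
--             break
--         if inputnum[-4:] == i[-4:]: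
--             money="1000"
--             break
--         if inputnum[-3:] == i[-3:]:
--             money="200"
--             break
--     return money
-- ===== SOURCE B (Python) =====
-- PRIZES = ((7, "4萬"), (6, "1萬"), (5, "4000"), (4, "1000"), (3, "200"))
--
--
-- def _suffix_len(a, b):
--     """Length of the longest common suffix of a and b."""
--     L = 0
--     for x, y in zip(reversed(a), reversed(b)):
--         if x != y:
--             break
--         L += 1
--     return L
--
--
-- def check_receipt(inputnum, nss, ns, n1):
--     money = "0"
--     if inputnum == nss:
--         money = "1000萬元"
--     if inputnum == ns:
--         money = "200萬"
--     for i in n1: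
--         if inputnum == i:
--             return "20萬"
--         L = _suffix_len(inputnum, i)
--         for k, prize in PRIZES:
--             if L >= k:
--                 return prize
--     return money
-- ===== Notes on version B (the rewrite author's own statement) =====
-- stated objective: alternative
-- what changed: B computes the longest common suffix length of inputnum and each candidate with one backwards scan and maps it through a threshold table (a length >= k iff A's k-character tail slices match once full equality has been ruled out), instead of A's six separate tail-slice string comparisons per candidate.
import Mathlib
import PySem

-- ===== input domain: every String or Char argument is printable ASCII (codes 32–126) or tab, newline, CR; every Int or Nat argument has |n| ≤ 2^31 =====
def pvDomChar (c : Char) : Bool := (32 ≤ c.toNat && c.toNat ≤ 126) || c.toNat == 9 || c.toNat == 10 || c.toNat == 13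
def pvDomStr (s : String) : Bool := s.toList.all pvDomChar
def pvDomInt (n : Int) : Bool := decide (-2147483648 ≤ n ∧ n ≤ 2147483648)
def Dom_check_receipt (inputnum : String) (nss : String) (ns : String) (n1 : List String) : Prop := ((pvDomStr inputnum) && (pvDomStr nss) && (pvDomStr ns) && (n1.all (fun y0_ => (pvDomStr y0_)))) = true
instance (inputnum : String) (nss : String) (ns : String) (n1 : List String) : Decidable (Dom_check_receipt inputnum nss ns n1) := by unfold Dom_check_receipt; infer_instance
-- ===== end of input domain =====

-- B classifies each candidate by the length of its longest common suffix with inputnum (one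
-- backwards scan per candidate, mapped through a threshold table) instead of A's six
-- tail-slice string comparisons; alternative, not faster.


-- ===== PORT A =====
-- A's for-loop over n1, branch for branch; python tail slices s[-k:] via PySem.Str.slice.
def checkLoopA (inputnum : String) : List String → String → String
  | [], money => money
  | i :: rest, money =>
    if inputnum = i then "20萬"
    else if PySem.Str.slice inputnum (some (-7)) none = PySem.Str.slice i (some (-7)) none then "4萬"
    else if PySem.Str.slice inputnum (some (-6)) none = PySem.Str.slice i (some (-6)) none then "1萬"
    else if PySem.Str.slice inputnum (some (-5)) none = PySem.Str.slice i (some (-5)) none then "4000"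
    else if PySem.Str.slice inputnum (some (-4)) none = PySem.Str.slice i (some (-4)) none then "1000"
    else if PySem.Str.slice inputnum (some (-3)) none = PySem.Str.slice i (some (-3)) none then "200"
    else checkLoopA inputnum rest money

def check_receipt (inputnum : String) (nss : String) (ns : String) (n1 : List String) : String :=
  let money := "0"
  let money := if inputnum = nss then "1000萬元" else money
  let money := if inputnum = ns then "200萬" else money
  checkLoopA inputnum n1 money

-- ===== PORT B =====
-- _suffix_len's loop over the zipped reversed strings = common prefix length of the reversed char lists.
def suffixLenAux : List Char → List Char → Nat
  | [], _ => 0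
  | _ :: _, [] => 0
  | x :: xs, y :: ys => if x = y then suffixLenAux xs ys + 1 else 0

def suffixLen (a b : String) : Nat := suffixLenAux a.toList.reverse b.toList.reverse

def prizeTable : List (Nat × String) :=
  [(7, "4萬"), (6, "1萬"), (5, "4000"), (4, "1000"), (3, "200")]

-- B's inner for-loop over PRIZES: the first tier whose threshold the suffix length reaches
def findPrize (L : Nat) : List (Nat × String) → Option String
  | [] => none
  | (k, prize) :: rest => if k ≤ L then some prize else findPrize L rest

def checkLoopB (inputnum : String) : List String → String → String
  | [], money => money
  | i :: rest, money =>
    if inputnum = i then "20萬"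
    else
      match findPrize (suffixLen inputnum i) prizeTable with
      | some prize => prize
      | none => checkLoopB inputnum rest money

def check_receipt_alt (inputnum : String) (nss : String) (ns : String) (n1 : List String) : String :=
  let money := "0"
  let money := if inputnum = nss then "1000萬元" else money
  let money := if inputnum = ns then "200萬" else money
  checkLoopB inputnum n1 money

-- ===== PRECONDITION & SPEC =====
def Spec_check_receipt (inputnum : String) (nss : String) (ns : String) (n1 : List String) (out : String) : Prop := out = check_receipt_alt inputnum nss ns n1
instance (inputnum : String) (nss : String) (ns : String) (n1 : List String) (out : String) : Decidable (Spec_check_receipt inputnum nss ns n1 out) := by unfold Spec_check_receipt; infer_instance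

-- ===== CLAIM (what is proved, stated in full; the proofs are below) =====
def Claim_equal_check_receipt : Prop := ∀ (inputnum : String) (nss : String) (ns : String) (n1 : List String), Dom_check_receipt inputnum nss ns n1 → Spec_check_receipt inputnum nss ns n1 (check_receipt inputnum nss ns n1)

-- ===== LEMMAS AND PROOFS =====

theorem suffixLenAux_le_left (u v : List Char) : suffixLenAux u v ≤ u.length := by
  induction u generalizing v with
  | nil => simp [suffixLenAux]
  | cons x xs ih =>
    cases v with
    | nil => simp [suffixLenAux]
    | cons y ys =>
      simp only [suffixLenAux]
      split
      · simpa using Nat.succ_le_succ (ih ys)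
      · simp

theorem suffixLenAux_le_right (u v : List Char) : suffixLenAux u v ≤ v.length := by
  induction u generalizing v with
  | nil => simp [suffixLenAux]
  | cons x xs ih =>
    cases v with
    | nil => simp [suffixLenAux]
    | cons y ys =>
      simp only [suffixLenAux]
      split
      · simpa using Nat.succ_le_succ (ih ys)
      · simp

theorem take_eq_iff_suffixLenAux (u v : List Char) (k : Nat) :
    u.take k = v.take k ↔ (min k u.length = min k v.length ∧ min k u.length ≤ suffixLenAux u v) := by
  induction u generalizing v k with
  | nil =>
    constructor
    · intro h
      have hl := congrArg List.length h
      simp only [List.length_take, List.length_nil] at hl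
      simp [suffixLenAux]
      omega
    · intro ⟨h, _⟩
      simp only [List.length_nil] at h
      have : v.take k = [] := List.eq_nil_of_length_eq_zero (by rw [List.length_take]; omega)
      simp [this]
  | cons x xs ih =>
    cases v with
    | nil =>
      constructor
      · intro h
        have hl := congrArg List.length h
        simp only [List.length_take, List.length_nil, List.length_cons] at hl
        simp only [suffixLenAux, List.length_cons, List.length_nil]
        omega
      · intro ⟨h, _⟩
        simp only [List.length_nil] at h
        have : (x :: xs).take k = [] := List.eq_nil_of_length_eq_zero (by rw [List.length_take]; omega)
        simp [this]
    | cons y ys =>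
      cases k with
      | zero => simp
      | succ n =>
        by_cases hxy : x = y
        · subst hxy
          simp [suffixLenAux, ih ys n]
        · simp [suffixLenAux, hxy]

theorem eq_iff_suffixLenAux (u v : List Char) :
    u = v ↔ (u.length = v.length ∧ u.length ≤ suffixLenAux u v) := by
  have h := take_eq_iff_suffixLenAux u v (max u.length v.length)
  rw [List.take_of_length_le (le_max_left _ _), List.take_of_length_le (le_max_right _ _)] at h
  rw [h]
  omega

theorem take_min_self {α : Type} (u : List α) (k : Nat) : u.take (min k u.length) = u.take k := by
  rcases Nat.le_total k u.length with h | h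
  · rw [Nat.min_eq_left h]
  · rw [Nat.min_eq_right h, List.take_of_length_le h, List.take_of_length_le (le_refl _)]

theorem slice_neg_eq_iff (a b : String) (k : Nat) (hk : 0 < k) :
    (PySem.Str.slice a (some (-(k : Int))) none = PySem.Str.slice b (some (-(k : Int))) none) ↔
      (min k a.length = min k b.length ∧ min k a.length ≤ suffixLen a b) := by
  have key : ∀ s : String,
      (PySem.Str.slice s (some (-(k : Int))) none).toList = s.toList.drop (s.toList.length - k) := by
    intro s
    simp [PySem.Str.toList_slice, PySem.Chars.slice_eq_listSlice,
      PySem.List.slice_from_neg_natCast _ _ hk]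
  have rev_drop : ∀ x : List Char, (x.drop (x.length - k)).reverse = x.reverse.take k := by
    intro x
    rw [List.reverse_drop]
    have h1 : x.length - (x.length - k) = min k x.length := by omega
    rw [h1, ← List.length_reverse (as := x), take_min_self]
  have hlen : ∀ s : String, s.length = s.toList.length := by intro s; simp
  constructor
  · intro h
    have h' : a.toList.drop (a.toList.length - k) = b.toList.drop (b.toList.length - k) := by
      rw [← key a, ← key b, h]
    have hrev : a.toList.reverse.take k = b.toList.reverse.take k := by
      rw [← rev_drop, ← rev_drop, h']
    have := (take_eq_iff_suffixLenAux _ _ k).mp hrev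
    simp only [List.length_reverse] at this
    rw [hlen a, hlen b]
    exact this
  · intro h
    have h' : a.toList.reverse.take k = b.toList.reverse.take k := by
      apply (take_eq_iff_suffixLenAux _ _ k).mpr
      simp only [List.length_reverse]
      rw [hlen a, hlen b] at h
      exact h
    have heq : a.toList.drop (a.toList.length - k) = b.toList.drop (b.toList.length - k) := by
      rw [← List.reverse_inj, rev_drop, rev_drop, h']
    have hl : (PySem.Str.slice a (some (-(k : Int))) none).toList =
        (PySem.Str.slice b (some (-(k : Int))) none).toList := by rw [key a, key b, heq]
    exact String.ext (by simpa using congrArg id hl)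

theorem str_eq_iff (a b : String) :
    a = b ↔ (a.length = b.length ∧ suffixLen a b = a.length) := by
  have hle : suffixLenAux a.toList.reverse b.toList.reverse ≤ a.toList.reverse.length :=
    suffixLenAux_le_left _ _
  have hlen : ∀ s : String, s.length = s.toList.length := by intro s; simp
  have key : a = b ↔ a.toList.reverse = b.toList.reverse := by
    constructor
    · intro h; rw [h]
    · intro h
      have := congrArg List.reverse h
      simp only [List.reverse_reverse] at this
      exact String.ext (by simpa using this)
  rw [key, eq_iff_suffixLenAux]
  simp only [List.length_reverse] at hle ⊢
  rw [hlen a, hlen b]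
  unfold suffixLen
  omega

-- With full equality already ruled out, A's tail-slice-k comparison is exactly “common suffix length ≥ k”.
theorem slice_neg_eq_iff_of_ne (a b : String) (k : Nat) (hk : 0 < k) (hne : a ≠ b) :
    (PySem.Str.slice a (some (-(k : Int))) none = PySem.Str.slice b (some (-(k : Int))) none) ↔
      k ≤ suffixLen a b := by
  rw [slice_neg_eq_iff a b k hk]
  have hla : suffixLen a b ≤ a.length := by
    have := suffixLenAux_le_left a.toList.reverse b.toList.reverse
    simpa [suffixLen] using this
  have hlb : suffixLen a b ≤ b.length := by
    have := suffixLenAux_le_right a.toList.reverse b.toList.reverse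
    simpa [suffixLen] using this
  constructor
  · intro ⟨h1, h2⟩
    by_contra hlt
    have hlt := Nat.lt_of_not_le hlt
    have hfa : a.length < k := by omega
    have hfb : b.length = a.length := by omega
    exact hne ((str_eq_iff a b).mpr ⟨hfb.symm, by omega⟩)
  · intro h
    constructor <;> omega

theorem loop_eq (inputnum : String) (n1 : List String) (money : String) :
    checkLoopA inputnum n1 money = checkLoopB inputnum n1 money := by
  induction n1 generalizing money with
  | nil => rfl
  | cons i rest ih =>
    by_cases heq : inputnum = i
    · simp [checkLoopA, checkLoopB, heq]
    · have mk7 := slice_neg_eq_iff_of_ne inputnum i 7 (by norm_num) heq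
      have mk6 := slice_neg_eq_iff_of_ne inputnum i 6 (by norm_num) heq
      have mk5 := slice_neg_eq_iff_of_ne inputnum i 5 (by norm_num) heq
      have mk4 := slice_neg_eq_iff_of_ne inputnum i 4 (by norm_num) heq
      have mk3 := slice_neg_eq_iff_of_ne inputnum i 3 (by norm_num) heq
      simp only [Nat.cast_ofNat] at mk7 mk6 mk5 mk4 mk3
      simp only [checkLoopA, checkLoopB, prizeTable, findPrize, heq, mk7, mk6, mk5, mk4, mk3, ih]
      split_ifs <;> simp

-- ===== VERDICT (by name: the statement is the Claim_ definition above) =====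
theorem check_receipt_spec : Claim_equal_check_receipt := by
  intro inputnum nss ns n1 _
  unfold Spec_check_receipt check_receipt check_receipt_alt
  simp only [loop_eq]
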